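-- pv_equiv track=rewrite | github.com/cagriemiracikkapi-projects/AgentSkills | .agents/skills/development/database-optimization/scripts/index_recommender.py | build_index_columns
-- ===== SOURCE A (Python) =====
-- HIGH_CARDINALITY_SUFFIXES = ("_id", "_uuid", "_token", "_key", "_hash", "_email")
--
-- LOW_CARDINALITY_SUFFIXES = ("_status", "_type", "_flag", "_bool", "_active", "_enabled")
--
-- def cardinality_rank(col: str) -> int:
--     """Higher = higher cardinality (better leading index column)."""
--     lower = col.lower()
--     if any(lower.endswith(s) for s in HIGH_CARDINALITY_SUFFIXES):
--         return 3
--     if any(lower.endswith(s) for s in LOW_CARDINALITY_SUFFIXES):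
--         return 1
--     return 2
--
-- def build_index_columns(
--     where_cols: list[tuple[str, str]],
--     join_cols: list[str],
--     order_cols: list[tuple[str, str]],
-- ) -> list[tuple[str, str]]:
--     """
--     Composite index column order rules:
--     1. Equality WHERE columns first (sorted by cardinality desc)
--     2. JOIN columns next
--     3. Range WHERE columns
--     4. ORDER BY columns last (preserving their direction)
--     """
--     seen: set[str] = set()
--     result: list[tuple[str, str]] = []
--
--     def add(col: str, direction: str = "ASC"):
--         if col.lower() not in seen and col.upper() not in {"AND", "OR", "NOT", "NULL"}:
--             seen.add(col.lower())
--             result.append((col, direction))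
--
--     # 1. Equality columns by cardinality
--     eq_cols = [(col, op) for col, op in where_cols if op == "eq"]
--     eq_cols.sort(key=lambda x: cardinality_rank(x[0]), reverse=True)
--     for col, _ in eq_cols:
--         add(col)
--
--     # 2. JOIN columns
--     for col in join_cols:
--         add(col)
--
--     # 3. Range columns
--     for col, op in where_cols:
--         if op == "range":
--             add(col)
--
--     # 4. ORDER BY columns
--     for col, direction in order_cols:
--         add(col, direction)
--
--     return result
-- ===== SOURCE B (Python) =====
-- HIGH_CARDINALITY_SUFFIXES = ("_id", "_uuid", "_token", "_key", "_hash", "_email")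
--
-- LOW_CARDINALITY_SUFFIXES = ("_status", "_type", "_flag", "_bool", "_active", "_enabled")
--
--
-- def cardinality_rank(col: str) -> int:
--     lower = col.lower()
--     if any(lower.endswith(s) for s in HIGH_CARDINALITY_SUFFIXES):
--         return 3
--     if any(lower.endswith(s) for s in LOW_CARDINALITY_SUFFIXES):
--         return 1
--     return 2
--
--
-- def build_index_columns(
--     where_cols: list[tuple[str, str]],
--     join_cols: list[str],
--     order_cols: list[tuple[str, str]],
-- ) -> list[tuple[str, str]]:
--     # Three-way bucket (counting) sort of the equality columns: one pass over
--     # where_cols fills rank buckets, concatenated high-to-low; then all four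
--     # phases are flattened into ONE candidate list deduplicated by a single
--     # final pass (no nested add() closure mutating outer state per phase).
--     b3: list[str] = []
--     b2: list[str] = []
--     b1: list[str] = []
--     for col, op in where_cols:
--         if op == "eq":
--             r = cardinality_rank(col)
--             if r == 3:
--                 b3.append(col)
--             elif r == 2:
--                 b2.append(col)
--             else:
--                 b1.append(col)
--     candidates = [(c, "ASC") for c in b3 + b2 + b1]
--     candidates += [(c, "ASC") for c in join_cols]
--     candidates += [(c, "ASC") for c, op in where_cols if op == "range"]
--     candidates += [(c, d) for c, d in order_cols]
--     seen: set[str] = set()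
--     result: list[tuple[str, str]] = []
--     for col, direction in candidates:
--         key = col.lower()
--         if key not in seen and col.upper() not in {"AND", "OR", "NOT", "NULL"}:
--             seen.add(key)
--             result.append((col, direction))
--     return result
-- ===== Notes on version B (the rewrite author's own statement) =====
-- stated objective: alternative
-- what changed: Replaced the stable reverse comparison sort of the equality columns with a one-pass three-way bucket (counting) sort concatenated high-rank-first, and fused the four add() phases into one flat candidate list deduplicated by a single final pass.
import Mathlib
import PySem

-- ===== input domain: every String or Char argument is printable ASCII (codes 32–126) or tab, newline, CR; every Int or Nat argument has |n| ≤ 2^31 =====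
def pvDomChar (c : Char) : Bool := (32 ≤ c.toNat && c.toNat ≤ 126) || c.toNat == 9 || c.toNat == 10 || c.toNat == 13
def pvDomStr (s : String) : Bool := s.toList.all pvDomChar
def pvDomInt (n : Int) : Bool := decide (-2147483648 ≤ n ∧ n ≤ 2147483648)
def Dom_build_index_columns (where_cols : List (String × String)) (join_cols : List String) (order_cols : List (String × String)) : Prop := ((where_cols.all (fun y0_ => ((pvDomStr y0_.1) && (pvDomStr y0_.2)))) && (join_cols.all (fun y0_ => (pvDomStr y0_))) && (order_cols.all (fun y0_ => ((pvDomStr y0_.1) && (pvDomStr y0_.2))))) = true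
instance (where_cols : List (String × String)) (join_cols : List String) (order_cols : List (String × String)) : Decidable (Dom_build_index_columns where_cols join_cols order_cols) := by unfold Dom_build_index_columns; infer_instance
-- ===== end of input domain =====

-- B replaces the stable reverse sort of the equality columns by a three-way bucket sort and
-- fuses the four add() phases into one candidate list with a single dedup pass (objective: alternative).

-- ===== PORT A =====
-- shared module helper (identical in Source A and Source B)
def cardinality_rank (col : String) : Int :=
  let lower := PySem.Str.lower col
  if (["_id", "_uuid", "_token", "_key", "_hash", "_email"].any
      (fun s => PySem.Str.endswith lower s)) then 3
  else if (["_status", "_type", "_flag", "_bool", "_active", "_enabled"].any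
      (fun s => PySem.Str.endswith lower s)) then 1
  else 2

-- A's inner closure add(col, direction): state = (seen, result)
def pvAddA (st : PySem.Set String × List (String × String)) (col : String) (direction : String) :
    PySem.Set String × List (String × String) :=
  if !(PySem.Set.contains st.1 (PySem.Str.lower col))
      && !(["AND", "OR", "NOT", "NULL"].contains (PySem.Str.upper col)) then
    (PySem.Set.add st.1 (PySem.Str.lower col), st.2 ++ [(col, direction)])
  else st

def build_index_columns (where_cols : List (String × String)) (join_cols : List String) (order_cols : List (String × String)) : List (String × String) :=
  let eq_cols := where_cols.filter (fun p => p.2 == "eq")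
  let eq_sorted := PySem.List.sorted eq_cols (fun p => cardinality_rank p.1) true
  let st0 : PySem.Set String × List (String × String) := (PySem.Set.empty, [])
  let st1 := eq_sorted.foldl (fun st p => pvAddA st p.1 "ASC") st0
  let st2 := join_cols.foldl (fun st c => pvAddA st c "ASC") st1
  let st3 := where_cols.foldl (fun st p => if p.2 == "range" then pvAddA st p.1 "ASC" else st) st2
  let st4 := order_cols.foldl (fun st p => pvAddA st p.1 p.2) st3
  st4.2

-- ===== PORT B =====
-- one pass over where_cols filling the three rank buckets (b3, b2, b1); loop body:
def pvBucketStep (b : List String × List String × List String) (p : String × String) :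
    List String × List String × List String :=
  if p.2 == "eq" then
    let r := cardinality_rank p.1
    if r == 3 then (b.1 ++ [p.1], b.2.1, b.2.2)
    else if r == 2 then (b.1, b.2.1 ++ [p.1], b.2.2)
    else (b.1, b.2.1, b.2.2 ++ [p.1])
  else b

def pvBuckets (where_cols : List (String × String)) : List String × List String × List String :=
  where_cols.foldl pvBucketStep ([], [], [])

def build_index_columns_alt (where_cols : List (String × String)) (join_cols : List String) (order_cols : List (String × String)) : List (String × String) :=
  let b := pvBuckets where_cols
  let candidates :=
    (b.1 ++ b.2.1 ++ b.2.2).map (fun c => (c, "ASC"))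
    ++ join_cols.map (fun c => (c, "ASC"))
    ++ (where_cols.filter (fun p => p.2 == "range")).map (fun p => (p.1, "ASC"))
    ++ order_cols.map (fun p => (p.1, p.2))
  let fin := candidates.foldl
    (fun st p =>
      if !(PySem.Set.contains st.1 (PySem.Str.lower p.1))
          && !(["AND", "OR", "NOT", "NULL"].contains (PySem.Str.upper p.1)) then
        (PySem.Set.add st.1 (PySem.Str.lower p.1), st.2 ++ [(p.1, p.2)])
      else st)
    ((PySem.Set.empty : PySem.Set String), ([] : List (String × String)))
  fin.2

-- ===== PRECONDITION & SPEC =====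
def Spec_build_index_columns (where_cols : List (String × String)) (join_cols : List String) (order_cols : List (String × String)) (out : List (String × String)) : Prop := out = build_index_columns_alt where_cols join_cols order_cols
instance (where_cols : List (String × String)) (join_cols : List String) (order_cols : List (String × String)) (out : List (String × String)) : Decidable (Spec_build_index_columns where_cols join_cols order_cols out) := by unfold Spec_build_index_columns; infer_instance

-- ===== CLAIM (what is proved, stated in full; the proofs are below) =====
def Claim_equal_build_index_columns : Prop := ∀ (where_cols : List (String × String)) (join_cols : List String) (order_cols : List (String × String)), Dom_build_index_columns where_cols join_cols order_cols → Spec_build_index_columns where_cols join_cols order_cols (build_index_columns where_cols join_cols order_cols)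

-- ===== LEMMAS AND PROOFS =====

-- cardinality_rank takes only the values 1, 2, 3
theorem rank_cases (c : String) :
    cardinality_rank c = 1 ∨ cardinality_rank c = 2 ∨ cardinality_rank c = 3 := by
  simp only [cardinality_rank]
  split_ifs <;> simp

-- insertBy lands just after the block A of elements it does not go before
theorem insertBy_append {α : Type} (before : α → α → Bool) (x : α) (A B : List α)
    (hA : ∀ y ∈ A, before x y = false)
    (hB : B = [] ∨ ∃ h t, B = h :: t ∧ before x h = true) :
    PySem.List.insertBy before x (A ++ B) = A ++ x :: B := by
  induction A with
  | nil =>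
      rcases hB with rfl | ⟨h, t, rfl, hh⟩
      · rfl
      · simp [PySem.List.insertBy, hh]
  | cons a A ih =>
      have ha : before x a = false := hA a (by simp)
      simp only [List.cons_append, PySem.List.insertBy, ha]
      simp [ih (fun y hy => hA y (by simp [hy]))]

-- insertBy appends when it goes before nothing
theorem insertBy_append_nil {α : Type} (before : α → α → Bool) (x : α) (A : List α)
    (hA : ∀ y ∈ A, before x y = false) :
    PySem.List.insertBy before x A = A ++ [x] := by
  have := insertBy_append before x A [] hA (Or.inl rfl)
  simpa using this

-- stable reverse sort by a {1,2,3}-valued key = three buckets, high rank first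
theorem sorted_rev_rank_eq_buckets (xs : List (String × String)) :
    PySem.List.sorted xs (fun p => cardinality_rank p.1) true =
      xs.filter (fun p => cardinality_rank p.1 == 3)
      ++ xs.filter (fun p => cardinality_rank p.1 == 2)
      ++ xs.filter (fun p => cardinality_rank p.1 == 1) := by
  induction xs using List.reverseRecOn with
  | nil => rfl
  | append_singleton ys x ih =>
      rw [PySem.List.sorted_rev_eq_foldl_insertBy] at *
      rw [List.foldl_append, List.foldl_cons, List.foldl_nil, ih]
      have keyx := rank_cases x.1
      have hmem2 : ∀ y ∈ ys.filter (fun p => cardinality_rank p.1 == 2),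
          cardinality_rank y.1 = 2 := by
        intro y hy; simpa using (List.of_mem_filter hy)
      have hmem1 : ∀ y ∈ ys.filter (fun p => cardinality_rank p.1 == 1),
          cardinality_rank y.1 = 1 := by
        intro y hy; simpa using (List.of_mem_filter hy)
      have hmem3 : ∀ y ∈ ys.filter (fun p => cardinality_rank p.1 == 3),
          cardinality_rank y.1 = 3 := by
        intro y hy; simpa using (List.of_mem_filter hy)
      rcases keyx with h1 | h2 | h3
      · -- rank 1: insert at the very end
        rw [insertBy_append_nil _ x _
          (by
            intro y hy
            rcases List.mem_append.1 hy with hy3 | hy21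
            · rcases List.mem_append.1 hy3 with hy3 | hy2
              · simp [h1, hmem3 y hy3]
              · simp [h1, hmem2 y hy2]
            · simp [h1, hmem1 y hy21])]
        simp [List.filter_append, h1]
      · -- rank 2: insert before the rank-1 block
        rw [insertBy_append _ x _ _
          (by
            intro y hy
            rcases List.mem_append.1 hy with hy3 | hy2
            · simp [h2, hmem3 y hy3]
            · simp [h2, hmem2 y hy2])
          (by
            cases hF : ys.filter (fun p => cardinality_rank p.1 == 1) with
            | nil => exact Or.inl rfl
            | cons h t =>
                refine Or.inr ⟨h, t, rfl, ?_⟩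
                have : cardinality_rank h.1 = 1 := hmem1 h (by simp [hF])
                simp [h2, this])]
        simp [List.filter_append, h2, List.append_assoc]
      · -- rank 3: insert before the rank-2/1 blocks
        rw [List.append_assoc]
        rw [insertBy_append _ x _ _
          (by intro y hy; simp [h3, hmem3 y hy])
          (by
            cases hF : ys.filter (fun p => cardinality_rank p.1 == 2)
                ++ ys.filter (fun p => cardinality_rank p.1 == 1) with
            | nil => exact Or.inl rfl
            | cons h t =>
                refine Or.inr ⟨h, t, rfl, ?_⟩
                have hm : h ∈ ys.filter (fun p => cardinality_rank p.1 == 2)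
                    ++ ys.filter (fun p => cardinality_rank p.1 == 1) := by simp [hF]
                rcases List.mem_append.1 hm with hy2 | hy1
                · simp [h3, hmem2 h hy2]
                · simp [h3, hmem1 h hy1])]
        simp [List.filter_append, h3, List.append_assoc]

-- B's bucket pass computes the three rank filters of the equality columns
theorem pvBuckets_eq (wc : List (String × String)) :
    pvBuckets wc =
      (((wc.filter (fun p => p.2 == "eq")).filter (fun p => cardinality_rank p.1 == 3)).map Prod.fst,
       ((wc.filter (fun p => p.2 == "eq")).filter (fun p => cardinality_rank p.1 == 2)).map Prod.fst,
       ((wc.filter (fun p => p.2 == "eq")).filter (fun p => cardinality_rank p.1 == 1)).map Prod.fst) := by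
  have aux : ∀ (l : List (String × String)) (a b c : List String),
      l.foldl pvBucketStep (a, b, c) =
      (a ++ ((l.filter (fun p => p.2 == "eq")).filter (fun p => cardinality_rank p.1 == 3)).map Prod.fst,
       b ++ ((l.filter (fun p => p.2 == "eq")).filter (fun p => cardinality_rank p.1 == 2)).map Prod.fst,
       c ++ ((l.filter (fun p => p.2 == "eq")).filter (fun p => cardinality_rank p.1 == 1)).map Prod.fst) := by
    intro l
    induction l with
    | nil => intro a b c; simp
    | cons p l ih =>
        intro a b c
        by_cases hop : p.2 == "eq"
        · rcases rank_cases p.1 with h1 | h2 | h3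
          · have hstep : pvBucketStep (a, b, c) p = (a, b, c ++ [p.1]) := by
              simp [pvBucketStep, hop, h1]
            rw [List.foldl_cons, hstep, ih]
            simp [hop, h1]
          · have hstep : pvBucketStep (a, b, c) p = (a, b ++ [p.1], c) := by
              simp [pvBucketStep, hop, h2]
            rw [List.foldl_cons, hstep, ih]
            simp [hop, h2]
          · have hstep : pvBucketStep (a, b, c) p = (a ++ [p.1], b, c) := by
              simp [pvBucketStep, hop, h3]
            rw [List.foldl_cons, hstep, ih]
            simp [hop, h3]
        · have hstep : pvBucketStep (a, b, c) p = (a, b, c) := by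
            simp [pvBucketStep, hop]
          rw [List.foldl_cons, hstep, ih]
          simp [hop]
  simpa using aux wc [] [] []

-- ===== VERDICT (by name: the statement is the Claim_ definition above) =====
theorem build_index_columns_spec : Claim_equal_build_index_columns := by
  intro wc jc oc _
  simp only [Spec_build_index_columns, build_index_columns, build_index_columns_alt,
    pvBuckets_eq, sorted_rev_rank_eq_buckets, PySem.List.foldl_if_eq_foldl_filter,
    List.foldl_append, List.foldl_map, List.map_append, Prod.mk.eta, pvAddA]
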